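-- pv_equiv track=rewrite | github.com/aryashah-AI/AI-Coaching-App | app.py | classify_phases
-- ===== SOURCE A (Python) =====
-- def classify_phases(events):
--     """
--     Classify triple jump phases based on detected events.
--
--     Args:
--         events: List of event types from detect_events()
--
--     Returns:
--         List of phase labels corresponding to segments between events
--     """
--     if len(events) < 2:
--         return ["approach"] if len(events) == 0 else ["hop"]
--
--     phases = []
--     phase_names = ["hop", "step", "jump"]
--     phase_index = 0
--
--     # Each pair of takeoff->landing represents one phase
--     for i in range(0, len(events) - 1, 2):
--         if i + 1 < len(events) and events[i] == "takeoff" and events[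
--             i + 1] == "landing":
--             if phase_index < len(phase_names):
--                 phases.append(phase_names[phase_index])
--                 phase_index += 1
--             else:
--                 phases.append("landing")
--
--     # Handle incomplete sequences
--     if len(events) % 2 == 1 and events[-1] == "takeoff":
--         if phase_index < len(phase_names):
--             phases.append(phase_names[phase_index])
--
--     return phases
-- ===== SOURCE B (Python) =====
-- def classify_phases(events):
--     if len(events) < 2:
--         return ["hop"] if events else ["approach"]
--     names = ["hop", "step", "jump"]
--     matched = 0
--     leftover = []
--     it = iter(events)
--     for first in it:
--         second = next(it, None)
--         if second is None:
--             leftover = [first]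
--             break
--         if first == "takeoff" and second == "landing":
--             matched += 1
--     phases = names[:matched] + ["landing"] * (matched - 3)
--     if leftover == ["takeoff"] and matched < 3:
--         phases.append(names[matched])
--     return phases
-- ===== Notes on version B (the rewrite author's own statement) =====
-- stated objective: alternative
-- what changed: Replaces A's index loop over range(0,len-1,2) that appends labels while incrementing a capped phase counter with a pairwise-consuming iterator loop that only counts matched takeoff/landing pairs and keeps the leftover odd element; the label list is then built in one shot from the count (a prefix of the three phase names plus replicated overflow labels), the trailing lone takeoff being detected from the leftover rather than by index parity.
import Mathlib
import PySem

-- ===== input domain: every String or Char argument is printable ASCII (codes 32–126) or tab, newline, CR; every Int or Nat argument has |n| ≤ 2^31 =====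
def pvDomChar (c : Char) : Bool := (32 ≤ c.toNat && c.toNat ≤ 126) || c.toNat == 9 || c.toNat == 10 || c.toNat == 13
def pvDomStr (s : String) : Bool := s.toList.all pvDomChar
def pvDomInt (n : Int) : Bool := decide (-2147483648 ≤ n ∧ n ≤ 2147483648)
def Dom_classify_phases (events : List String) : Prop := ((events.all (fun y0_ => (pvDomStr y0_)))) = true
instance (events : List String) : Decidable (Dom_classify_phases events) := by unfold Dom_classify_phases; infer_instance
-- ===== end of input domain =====

-- B replaces A's index loop + interleaved append/increment by a pairwise-consuming count loop
-- followed by one-shot construction of the labels (same O(n) cost; objective: alternative decomposition).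

-- ===== PORT A =====
-- literal port of A: fold over range(0, len-1, 2) carrying (phases, phase_index)
def classify_phases (events : List String) : List String :=
  if events.length < 2 then
    (if events.length = 0 then ["approach"] else ["hop"])
  else
    let phase_names : List String := ["hop", "step", "jump"]
    let st :=
      (PySem.List.pyRange 0 ((events.length : Int) - 1) 2).foldl
        (fun (st : List String × Nat) i =>
          if (i + 1 < (events.length : Int)) ∧
             PySem.List.pyGet? events i = some "takeoff" ∧
             PySem.List.pyGet? events (i + 1) = some "landing" then
            if st.2 < phase_names.length then
              (st.1 ++ [phase_names.getD st.2 ""], st.2 + 1)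
            else
              (st.1 ++ ["landing"], st.2)
          else st)
        ([], 0)
    if (events.length : Int) % 2 = 1 ∧ PySem.List.pyGet? events (-1) = some "takeoff" then
      (if st.2 < phase_names.length then st.1 ++ [phase_names.getD st.2 ""] else st.1)
    else st.1

-- ===== PORT B =====
-- the while loop of Source B: consume two events at a time, count matched pairs, return the leftover
def pvPairs (m : Nat) : List String → Nat × List String
  | a :: b :: tl => pvPairs (if a = "takeoff" ∧ b = "landing" then m + 1 else m) tl
  | rest => (m, rest)

def classify_phases_alt (events : List String) : List String :=
  if events.length < 2 then
    (if events ≠ [] then ["hop"] else ["approach"])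
  else
    let names : List String := ["hop", "step", "jump"]
    let p := pvPairs 0 events
    let phases := names.take p.1 ++ List.replicate (p.1 - 3) "landing"
    if p.2 = ["takeoff"] ∧ p.1 < 3 then phases ++ [names.getD p.1 ""] else phases

-- ===== PRECONDITION & SPEC =====
def Spec_classify_phases (events : List String) (out : List String) : Prop := out = classify_phases_alt events
instance (events : List String) (out : List String) : Decidable (Spec_classify_phases events out) := by unfold Spec_classify_phases; infer_instance

-- ===== CLAIM (what is proved, stated in full; the proofs are below) =====
def Claim_equal_classify_phases : Prop := ∀ (events : List String), Dom_classify_phases events → Spec_classify_phases events (classify_phases events)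

-- ===== LEMMAS AND PROOFS =====

-- the label of slot j, shared shape of both constructions
def pvLabel (j : Nat) : String :=
  if j < 3 then (["hop", "step", "jump"] : List String).getD j "" else "landing"

def pvLabels (n : Nat) : List String := (List.range n).map pvLabel

-- A's matched-pair count: matched even indices of range(0, len-1, 2)
def pvCnt (l : List String) : Nat :=
  ((PySem.List.pyRange 0 ((l.length : Int) - 1) 2).filter
    (fun i =>
      PySem.List.pyGet? l i = some "takeoff" ∧
      PySem.List.pyGet? l (i + 1) = some "landing")).length

lemma pvLabels_succ (n : Nat) : pvLabels (n + 1) = pvLabels n ++ [pvLabel n] := by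
  simp [pvLabels, List.range_succ]

-- one matched step from state (pvLabels m, min m 3) yields (pvLabels (m+1), min (m+1) 3)
lemma pvStep_match (m : Nat) :
    (if min m 3 < (["hop", "step", "jump"] : List String).length then
       (pvLabels m ++ [(["hop", "step", "jump"] : List String).getD (min m 3) ""], min m 3 + 1)
     else (pvLabels m ++ ["landing"], min m 3)) = (pvLabels (m + 1), min (m + 1) 3) := by
  by_cases hm : m < 3
  · rw [if_pos (by simp only [List.length_cons, List.length_nil]; omega)]
    have h1 : min m 3 = m := by omega
    rw [h1, pvLabels_succ, pvLabel, if_pos hm]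
    have h2 : m + 1 = min (m + 1) 3 := by omega
    rw [← h2]
  · rw [if_neg (by simp only [List.length_cons, List.length_nil]; omega)]
    rw [pvLabels_succ, pvLabel, if_neg hm]
    have h2 : min m 3 = min (m + 1) 3 := by omega
    rw [h2]

-- invariant: A's fold over any index list, started at (pvLabels m, min m 3),
-- ends at (pvLabels (m + c), min (m + c) 3), where c counts the matched pairs,
-- provided every index satisfies the bound conjunct of A's condition.
lemma pvFold_inv (events : List String) (ℓ : List Int)
    (hb : ∀ i ∈ ℓ, i + 1 < (events.length : Int)) (m : Nat) :
    ℓ.foldl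
      (fun (st : List String × Nat) i =>
        if (i + 1 < (events.length : Int)) ∧
           PySem.List.pyGet? events i = some "takeoff" ∧
           PySem.List.pyGet? events (i + 1) = some "landing" then
          if st.2 < (["hop", "step", "jump"] : List String).length then
            (st.1 ++ [(["hop", "step", "jump"] : List String).getD st.2 ""], st.2 + 1)
          else
            (st.1 ++ ["landing"], st.2)
        else st)
      (pvLabels m, min m 3)
    = (pvLabels (m + (ℓ.filter
        (fun i =>
          PySem.List.pyGet? events i = some "takeoff" ∧
          PySem.List.pyGet? events (i + 1) = some "landing")).length),
       min (m + (ℓ.filter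
        (fun i =>
          PySem.List.pyGet? events i = some "takeoff" ∧
          PySem.List.pyGet? events (i + 1) = some "landing")).length) 3) := by
  induction ℓ generalizing m with
  | nil => simp
  | cons a tl ih =>
    have ha := hb a (List.mem_cons_self ..)
    have htl : ∀ i ∈ tl, i + 1 < (events.length : Int) :=
      fun i hi => hb i (List.mem_cons_of_mem _ hi)
    simp only [List.foldl_cons, List.filter_cons]
    by_cases hp : PySem.List.pyGet? events a = some "takeoff" ∧
        PySem.List.pyGet? events (a + 1) = some "landing"
    · rw [if_pos ⟨ha, hp⟩, pvStep_match, if_pos (by simp only [decide_eq_true_eq]; exact hp),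
        ih htl (m + 1)]
      simp only [List.length_cons]
      rw [Nat.add_right_comm m 1, Nat.add_assoc]
    · rw [if_neg (by tauto), if_neg (by simp only [decide_eq_true_eq]; exact hp)]
      exact ih htl m

-- every index of range(0, len-1, 2) is nonnegative and below len-1
lemma pvMem_range_two (b i : Int) (h : i ∈ PySem.List.pyRange 0 b 2) : 0 ≤ i ∧ i < b := by
  have := (PySem.List.mem_pyRange_iff_of_pos (by norm_num) i).mp h
  exact ⟨this.1, this.2.1⟩

-- step-2 range decompositions
lemma pvRange_two_cons (c : Int) (h : 0 < c) :
    PySem.List.pyRange 0 c 2 = 0 :: PySem.List.pyRange 2 c 2 := by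
  rw [PySem.List.pyRange_of_pos _ _ (by norm_num), PySem.List.pyRange_of_pos _ _ (by norm_num)]
  have hn : (if (0:Int) < c then ((c - 0 + 2 - 1) / 2).toNat else 0)
      = (if (2:Int) < c then ((c - 2 + 2 - 1) / 2).toNat else 0) + 1 := by
    split_ifs <;> omega
  rw [hn, List.range_succ_eq_map, List.map_cons, List.map_map]
  refine congrArg₂ _ (by norm_num) ?_
  exact List.map_congr_left (fun k _ => by simp [Function.comp]; ring)

lemma pvRange_two_shift (b : Int) :
    PySem.List.pyRange 2 (b + 2) 2 = (PySem.List.pyRange 0 b 2).map (· + 2) := by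
  rw [PySem.List.pyRange_of_pos _ _ (by norm_num), PySem.List.pyRange_of_pos _ _ (by norm_num),
    List.map_map]
  have hn : (if (2:Int) < b + 2 then ((b + 2 - 2 + 2 - 1) / 2).toNat else 0)
      = (if (0:Int) < b then ((b - 0 + 2 - 1) / 2).toNat else 0) := by
    split_ifs <;> omega
  rw [hn]
  exact List.map_congr_left (fun k _ => by simp; ring)

-- the pair count of A telescopes two events at a time
lemma pvCnt_cons2 (a b : String) (tl : List String) :
    pvCnt (a :: b :: tl) = (if a = "takeoff" ∧ b = "landing" then 1 else 0) + pvCnt tl := by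
  unfold pvCnt
  have hlen : ((a :: b :: tl).length : Int) - 1 = ((tl.length : Int) - 1) + 2 := by
    simp; omega
  have h0 : (decide (PySem.List.pyGet? (a :: b :: tl) 0 = some "takeoff" ∧
      PySem.List.pyGet? (a :: b :: tl) (0 + 1) = some "landing"))
      = decide (a = "takeoff" ∧ b = "landing") := by
    have g0 : PySem.List.pyGet? (a :: b :: tl) 0 = some a := by
      simp
    have g1 : PySem.List.pyGet? (a :: b :: tl) (0 + 1) = some b := by
      simp
    rw [g0, g1]; simp
  have hshift : ∀ i ∈ PySem.List.pyRange 0 ((tl.length : Int) - 1) 2,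
      ((fun i => decide (PySem.List.pyGet? (a :: b :: tl) i = some "takeoff" ∧
          PySem.List.pyGet? (a :: b :: tl) (i + 1) = some "landing")) ∘ (· + 2)) i
      = decide (PySem.List.pyGet? tl i = some "takeoff" ∧
          PySem.List.pyGet? tl (i + 1) = some "landing") := by
    intro i hi
    obtain ⟨hi0, _⟩ := pvMem_range_two _ _ hi
    obtain ⟨k, rfl⟩ := Int.eq_ofNat_of_zero_le hi0
    have e1 : ((k : Int) + 2) = ((k + 2 : Nat) : Int) := by push_cast; ring
    have e3 : ((k : Int) + 1) = ((k + 1 : Nat) : Int) := by push_cast; ring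
    have e4 : (((k + 2 : Nat) : Int) + 1) = ((k + 3 : Nat) : Int) := by push_cast; ring
    simp only [Function.comp]
    simp only [e1, e3, e4]
    simp only [PySem.List.pyGet?_natCast]
    simp [List.getElem?_cons_succ]
  rw [hlen, pvRange_two_cons _ (by omega), pvRange_two_shift, List.filter_cons,
    List.filter_map, List.filter_congr hshift, h0]
  by_cases hab : a = "takeoff" ∧ b = "landing"
  · simp [hab, Nat.add_comm]
  · simp [hab]

-- pyRange 0 c 2 is empty when c ≤ 0
lemma pvRange_two_nil (c : Int) (h : c ≤ 0) : PySem.List.pyRange 0 c 2 = [] := by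
  rw [PySem.List.pyRange_of_pos _ _ (by norm_num : (0:Int) < 2), if_neg (by omega)]
  simp

-- Source B's loop computes A's count and the leftover suffix (empty or the last element)
lemma pvPairs_spec : ∀ (m : Nat) (l : List String),
    pvPairs m l = (m + pvCnt l,
      if l.length % 2 = 0 then [] else l.drop (l.length - 1)) := by
  intro m l
  induction m, l using pvPairs.induct with
  | case1 m a b tl ih =>
    rw [pvPairs, ih, pvCnt_cons2]
    refine congrArg₂ _ (by split_ifs <;> omega) ?_
    have hlen : (a :: b :: tl).length = tl.length + 2 := by simp
    rw [hlen]
    by_cases hpar : tl.length % 2 = 0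
    · rw [if_pos hpar, if_pos (by omega)]
    · rw [if_neg hpar, if_neg (by omega)]
      have h1 : tl.length + 2 - 1 = (tl.length - 1) + 2 := by omega
      rw [h1]
      simp [List.drop_succ_cons]
  | case2 m rest h =>
    have r1 : PySem.List.pyRange 0 (-1 : Int) 2 = [] := pvRange_two_nil _ (by omega)
    have r0 : PySem.List.pyRange 0 (0 : Int) 2 = [] := pvRange_two_nil _ (by omega)
    match rest with
    | [] => simp [pvPairs, pvCnt, r1]
    | [x] => simp [pvPairs, pvCnt, r0]
    | a :: b :: tl => exact absurd rfl (h a b tl)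

-- the final label list: A's interleaved construction equals B's one-shot construction
lemma pvLabels_eq_take (c : Nat) :
    pvLabels c = (["hop", "step", "jump"] : List String).take c
      ++ List.replicate (c - 3) "landing" := by
  induction c with
  | zero => simp [pvLabels]
  | succ n ih =>
    rw [pvLabels_succ, ih]
    by_cases hn : n < 3
    · interval_cases n <;> simp [pvLabel]
    · have h3 : (["hop", "step", "jump"] : List String).take n
          = (["hop", "step", "jump"] : List String).take (n + 1) := by
        rw [List.take_of_length_le (by simp; omega), List.take_of_length_le (by simp; omega)]
      have h4 : n + 1 - 3 = (n - 3) + 1 := by omega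
      rw [pvLabel, if_neg hn, h3, h4, List.replicate_succ', List.append_assoc]

-- Source B's leftover test equals A's parity/last-element test (for nonempty input)
lemma pvLeftover_iff (events : List String) (h : events ≠ []) :
    ((if events.length % 2 = 0 then ([] : List String)
      else events.drop (events.length - 1)) = ["takeoff"])
    ↔ ((events.length : Int) % 2 = 1 ∧ PySem.List.pyGet? events (-1) = some "takeoff") := by
  rw [PySem.List.pyGet?_neg_one, List.getLast?_eq_some_getLast h, List.drop_length_sub_one h]
  by_cases hpar : events.length % 2 = 0
  · rw [if_pos hpar]
    constructor
    · intro hc; exact absurd hc (by simp)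
    · intro hc; exfalso; omega
  · rw [if_neg hpar]
    constructor
    · intro hc
      refine ⟨by omega, ?_⟩
      simp only [List.cons.injEq] at hc
      rw [hc.1]
    · intro hc
      simp only [Option.some.injEq] at hc
      rw [hc.2]

-- ===== VERDICT (by name: the statement is the Claim_ definition above) =====
theorem classify_phases_spec : Claim_equal_classify_phases := by
  intro events _
  unfold Spec_classify_phases classify_phases classify_phases_alt
  by_cases hlen : events.length < 2
  · rcases events with _ | ⟨x, tl⟩
    · simp
    · have htl : tl = [] := by
        cases tl with
        | nil => rfl
        | cons y ys => simp at hlen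
      subst htl; simp
  · simp only [if_neg hlen]
    have hne : events ≠ [] := by
      intro h; rw [h] at hlen; exact hlen (by simp)
    have hb : ∀ i ∈ PySem.List.pyRange 0 ((events.length : Int) - 1) 2,
        i + 1 < (events.length : Int) := by
      intro i hi
      have := pvMem_range_two _ _ hi
      omega
    have h0 : pvLabels 0 = [] := by simp [pvLabels]
    have hmin0 : min 0 3 = 0 := by omega
    have hfold := pvFold_inv events (PySem.List.pyRange 0 ((events.length : Int) - 1) 2) hb 0
    rw [h0, hmin0] at hfold
    simp only [Nat.zero_add] at hfold
    have hcnt : ((PySem.List.pyRange 0 ((events.length : Int) - 1) 2).filter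
        (fun i => PySem.List.pyGet? events i = some "takeoff" ∧
          PySem.List.pyGet? events (i + 1) = some "landing")).length = pvCnt events := rfl
    rw [hcnt] at hfold
    rw [hfold, pvPairs_spec 0 events]
    set c := pvCnt events with hc
    simp only [Nat.zero_add]
    have hphases : (["hop", "step", "jump"] : List String).take c
        ++ List.replicate (c - 3) "landing" = pvLabels c := (pvLabels_eq_take c).symm
    rw [hphases]
    by_cases hodd : (events.length : Int) % 2 = 1 ∧ PySem.List.pyGet? events (-1) = some "takeoff"
    · by_cases hc3 : c < 3
      · have h1 : min c 3 = c := by omega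
        rw [if_pos hodd, h1,
          if_pos (show c < (["hop", "step", "jump"] : List String).length by
            simp only [List.length_cons, List.length_nil]; omega),
          if_pos (show (if events.length % 2 = 0 then ([] : List String)
              else events.drop (events.length - 1)) = ["takeoff"] ∧ c < 3 from
            ⟨(pvLeftover_iff events hne).mpr hodd, hc3⟩)]
      · have h1 : min c 3 = 3 := by omega
        rw [if_pos hodd, h1,
          if_neg (show ¬ (3 < (["hop", "step", "jump"] : List String).length) by
            simp only [List.length_cons, List.length_nil]; omega),
          if_neg (show ¬ ((if events.length % 2 = 0 then ([] : List String)
              else events.drop (events.length - 1)) = ["takeoff"] ∧ c < 3) by tauto)]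
    · rw [if_neg hodd,
        if_neg (show ¬ ((if events.length % 2 = 0 then ([] : List String)
            else events.drop (events.length - 1)) = ["takeoff"] ∧ c < 3) by
          intro hcon
          exact hodd ((pvLeftover_iff events hne).mp hcon.1))]
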